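-- pv_equiv track=rewrite | github.com/MayuriBhalani-20/Logical-Riddles | riddle37.py | remove_letters
-- ===== SOURCE A (Python) =====
-- def remove_letters(list1,  string1):
--     list2 = list1.copy()
--
--     for i in list1:
--         for j in string1:
--             if i == j:
--                 list2.remove(i)
--                 string1 = string1[:string1.index(j)] + string1[string1.index(j) + 1:]
--                 i = ''
--                 break
--
--
--     return list2
-- ===== SOURCE B (Python) =====
-- def remove_letters(list1, string1):
--     # Loop over the subtrahend string instead of over list1: for each character,
--     # delete its first occurrence from the (copied) list if present.
--     list2 = list1.copy()
--     for c in string1: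
--         if c in list2:
--             list2.remove(c)
--     return list2
-- ===== Notes on version B (the rewrite author's own statement) =====
-- stated objective: simpler
-- what changed: Transposes the loops: instead of scanning list1 and rebuilding string1 by index/slice on every hit, B copies the list once and, for each character of string1, removes its first occurrence from the copy if present.
import Mathlib
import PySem

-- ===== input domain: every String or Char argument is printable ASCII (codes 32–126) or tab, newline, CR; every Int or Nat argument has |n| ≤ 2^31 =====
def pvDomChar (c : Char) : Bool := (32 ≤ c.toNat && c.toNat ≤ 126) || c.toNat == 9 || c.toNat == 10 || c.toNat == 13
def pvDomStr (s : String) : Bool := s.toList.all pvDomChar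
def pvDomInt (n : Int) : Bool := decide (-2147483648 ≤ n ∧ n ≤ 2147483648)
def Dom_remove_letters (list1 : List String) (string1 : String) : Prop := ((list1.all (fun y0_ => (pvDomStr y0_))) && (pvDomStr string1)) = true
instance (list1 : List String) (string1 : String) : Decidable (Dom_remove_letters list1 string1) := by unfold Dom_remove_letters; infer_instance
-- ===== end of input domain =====

-- B transposes A's loops (iterate string1, remove from a list copy); equivalence of return values is proved below.
-- ===== PORT A =====
-- the mutable string1 is tracked as its list of code points (exact: Python str iteration/slicing is by code point)
-- inner 'for j in string1: if i == j: …; break'  =  act on the first j in s with i == str(j), if any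
def pvInnerA (i : String) (l2 : List String) (s : List Char) : List String × List Char :=
  match s.find? (fun j => i == String.ofList [j]) with
  | none => (l2, s)
  | some j =>
    -- list2.remove(i): i ∈ list2 whenever this branch runs (invariant proved below), so Python never raises
    let l2' := (PySem.List.remove? l2 i).getD l2
    -- string1.index(j): j ∈ s here, so index? is some
    let idx : Nat := (PySem.List.index? s j).getD 0
    (l2', PySem.List.slice s none (some (idx : Int)) ++ PySem.List.slice s (some ((idx : Int) + 1)) none)

def remove_letters (list1 : List String) (string1 : String) : List String :=
  (list1.foldl (fun st i => pvInnerA i st.1 st.2) (list1, string1.toList)).1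

-- ===== PORT B =====
def remove_letters_alt (list1 : List String) (string1 : String) : List String :=
  string1.toList.foldl
    (fun l2 c =>
      if String.ofList [c] ∈ l2 then
        -- list2.remove(c): membership just checked, remove? is some
        (PySem.List.remove? l2 (String.ofList [c])).getD l2
      else l2)
    list1

-- ===== PRECONDITION & SPEC =====
def Spec_remove_letters (list1 : List String) (string1 : String) (out : List String) : Prop := out = remove_letters_alt list1 string1
instance (list1 : List String) (string1 : String) (out : List String) : Decidable (Spec_remove_letters list1 string1 out) := by unfold Spec_remove_letters; infer_instance

-- ===== CLAIM (what is proved, stated in full; the proofs are below) =====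
def Claim_equal_remove_letters : Prop := ∀ (list1 : List String) (string1 : String), Dom_remove_letters list1 string1 → Spec_remove_letters list1 string1 (remove_letters list1 string1)

-- ===== LEMMAS AND PROOFS =====

-- canonical form both ports are reduced to: greedy first-occurrence multiset subtraction, recursing on the list
def pvSub : List String → List Char → List String
  | [], _ => []
  | i :: t, s =>
    match s.find? (fun j => i == String.ofList [j]) with
    | some j => pvSub t (s.erase j)
    | none => i :: pvSub t s

-- any j the inner scan finds satisfies i = str(j)
theorem pvFind_eq {i : String} {s : List Char} {j : Char}
    (h : s.find? (fun j => i == String.ofList [j]) = some j) : i = String.ofList [j] := by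
  have := List.find?_some h
  simpa using this

-- the slice expression of A equals erasing the first occurrence of j
theorem pvSlice_erase {s : List Char} {j : Char} (hj : j ∈ s) :
    PySem.List.slice s none (some (((PySem.List.index? s j).getD 0 : Nat) : Int)) ++
      PySem.List.slice s (some ((((PySem.List.index? s j).getD 0 : Nat) : Int) + 1)) none
    = s.erase j := by
  have hsome : (PySem.List.index? s j).isSome := (PySem.List.index?_isSome_iff s j).2 hj
  obtain ⟨k, hk⟩ := Option.isSome_iff_exists.1 hsome
  obtain ⟨pre, suf, hs, hlen, hpre⟩ := (PySem.List.index?_eq_some_iff s j k).1 hk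
  rw [hk]
  simp only [Option.getD_some]
  have h1 : PySem.List.slice s none (some ((k : Nat) : Int)) = s.take k :=
    PySem.List.slice_to_natCast s k
  have h2 : ((k : Int) + 1) = ((k + 1 : Nat) : Int) := by push_cast; ring
  have h3 : PySem.List.slice s (some ((k + 1 : Nat) : Int)) none = s.drop (k + 1) :=
    PySem.List.slice_from_natCast s (k + 1)
  rw [h1, h2, h3, hs]
  subst hlen
  rw [List.take_left, List.erase_append_right _ (by simpa using hpre),
      List.erase_cons_head]
  have hd : List.drop (pre.length + 1) (pre ++ j :: suf) = suf := by
    simp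
  rw [hd]

-- A's fold equals pvSub: the processed survivors in acc never match a char still in s,
-- so list2.remove(i) removes exactly the current element
theorem pvA_eq (rest : List String) :
    ∀ (acc : List String) (s : List Char),
      (∀ v ∈ acc, ∀ c ∈ s, v ≠ String.ofList [c]) →
      (rest.foldl (fun st i => pvInnerA i st.1 st.2) (acc ++ rest, s)).1 = acc ++ pvSub rest s := by
  induction rest with
  | nil => intro acc s _; simp [pvSub]
  | cons i t ih =>
    intro acc s hinv
    simp only [List.foldl_cons, pvSub]
    cases hfind : s.find? (fun j => i == String.ofList [j]) with
    | none =>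
      have hstep : pvInnerA i (acc ++ i :: t) s = (acc ++ i :: t, s) := by
        simp [pvInnerA, hfind]
      rw [hstep]
      have hnomatch : ∀ c ∈ s, i ≠ String.ofList [c] := by
        intro c hc
        have := List.find?_eq_none.1 hfind c hc
        simpa using this
      have hinv' : ∀ v ∈ acc ++ [i], ∀ c ∈ s, v ≠ String.ofList [c] := by
        intro v hv c hc
        rcases List.mem_append.1 hv with h | h
        · exact hinv v h c hc
        · simp only [List.mem_singleton] at h; subst h; exact hnomatch c hc
      have := ih (acc ++ [i]) s hinv'
      simpa [List.append_assoc] using this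
    | some j =>
      have hij : i = String.ofList [j] := pvFind_eq hfind
      have hjs : j ∈ s := List.mem_of_find?_eq_some hfind
      have hiacc : i ∉ acc := fun h => hinv i h j hjs hij
      have hmem : i ∈ acc ++ i :: t := by simp
      have hstep : pvInnerA i (acc ++ i :: t) s = (acc ++ t, s.erase j) := by
        simp only [pvInnerA, hfind]
        rw [PySem.List.remove?_eq_some_erase _ i hmem]
        simp only [Option.getD_some]
        rw [List.erase_append_right _ hiacc, List.erase_cons_head,
            pvSlice_erase hjs]
      rw [hstep]
      have hinv' : ∀ v ∈ acc, ∀ c ∈ s.erase j, v ≠ String.ofList [c] := fun v hv c hc =>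
        hinv v hv c (List.mem_of_mem_erase hc)
      exact ih acc (s.erase j) hinv'

-- B's one-char step, with the remove? discharged by the membership test
theorem pvB_step (l : List String) (c : Char) :
    (if String.ofList [c] ∈ l then (PySem.List.remove? l (String.ofList [c])).getD l else l)
      = if String.ofList [c] ∈ l then l.erase (String.ofList [c]) else l := by
  by_cases h : String.ofList [c] ∈ l
  · simp [h, PySem.List.remove?_eq_some_erase _ _ h]
  · simp [h]

theorem pvCond_cons {i : String} {t : List String} {c : Char} (hic : i ≠ String.ofList [c]) :
    (if String.ofList [c] ∈ i :: t then (i :: t).erase (String.ofList [c]) else i :: t)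
      = i :: (if String.ofList [c] ∈ t then t.erase (String.ofList [c]) else t) := by
  by_cases h : String.ofList [c] ∈ t
  · rw [if_pos (List.mem_cons_of_mem _ h), List.erase_cons_tail (by simpa using hic), if_pos h]
  · have hni : (String.ofList [c]) ∉ i :: t := by
      intro hm
      rcases List.mem_cons.1 hm with h1 | h2
      · exact hic h1.symm
      · exact h h2
    rw [if_neg hni, if_neg h]

-- pulling one character through pvSub (the loop-transposition commutation)
theorem pvSub_nil : ∀ l : List String, pvSub l [] = l := by
  intro l
  induction l with
  | nil => simp [pvSub]
  | cons i t ih => simp [pvSub, ih]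

theorem pvSub_cons_comm (c : Char) (l : List String) (s : List Char) :
    pvSub l (c :: s) = pvSub (if String.ofList [c] ∈ l then l.erase (String.ofList [c]) else l) s := by
  induction l generalizing s with
  | nil => simp [pvSub]
  | cons i t ih =>
    by_cases hic : i = String.ofList [c]
    · subst hic
      have : (c :: s).find? (fun j => String.ofList [c] == String.ofList [j]) = some c := by
        simp [List.find?_cons_of_pos]
      simp [pvSub, this, List.erase_cons_head]
    · -- head char c does not match i
      have hfind : (c :: s).find? (fun j => i == String.ofList [j])
          = s.find? (fun j => i == String.ofList [j]) := by
        rw [List.find?_cons_of_neg]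
        simpa using hic
      cases hf : s.find? (fun j => i == String.ofList [j]) with
      | some j =>
        have hij : i = String.ofList [j] := pvFind_eq hf
        have hjc : j ≠ c := fun h => hic (by rw [hij, h])
        have he : (c :: s).erase j = c :: s.erase j :=
          List.erase_cons_tail (by simp [Ne.symm hjc])
        -- LHS: i matches j in c::s, leaving c :: s.erase j
        have hLHS : pvSub (i :: t) (c :: s) = pvSub t (c :: s.erase j) := by
          simp [pvSub, hfind, hf, he]
        -- RHS: the conditional erase keeps i at the head; i still matches j in s
        rw [hLHS, ih, pvCond_cons hic]
        simp [pvSub, hf]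
      | none =>
        have hLHS : pvSub (i :: t) (c :: s) = i :: pvSub t (c :: s) := by
          simp [pvSub, hfind, hf]
        rw [hLHS, ih, pvCond_cons hic]
        simp [pvSub, hf]

-- B's fold equals pvSub
theorem pvB_eq (s : List Char) :
    ∀ l : List String,
      s.foldl (fun l2 c =>
        if String.ofList [c] ∈ l2 then (PySem.List.remove? l2 (String.ofList [c])).getD l2 else l2) l
      = pvSub l s := by
  induction s with
  | nil => intro l; simp [pvSub_nil]
  | cons c s ih =>
    intro l
    simp only [List.foldl_cons]
    rw [pvB_step, ih, ← pvSub_cons_comm]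

-- ===== VERDICT (by name: the statement is the Claim_ definition above) =====
theorem remove_letters_spec : Claim_equal_remove_letters := by
  intro list1 string1 _
  unfold Spec_remove_letters remove_letters remove_letters_alt
  rw [pvB_eq]
  have := pvA_eq list1 [] string1.toList (by simp)
  simpa using this
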